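-- pv_equiv track=rewrite | github.com/Sivolc2/redpoint_hacks | img2graph.py | get_character_coocurrence_counts
-- ===== SOURCE A (Python) =====
-- from collections import Counter
--
-- def get_character_coocurrence_counts(character_names, locs, window=25):
--     nodes = Counter()
--     edges = {}
--
--     for idx, (char_id, loc) in enumerate(locs):
--         name1 = character_names[char_id]
--         nodes[name1] += 1
--         if name1 not in edges:
--             edges[name1] = Counter()
--
--         nextChar = idx
--         while nextChar < len(locs) - 1:
--             nextChar += 1
--             (next_char_id, next_loc) = locs[nextChar]
--             if next_loc - loc > window:
--                 break
--             name2 = character_names[next_char_id]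
--             if next_char_id != char_id:
--                 edges[name1][name2] += 1
--
--     return nodes, edges
-- ===== SOURCE B (Python) =====
-- from collections import Counter
--
-- def get_character_coocurrence_counts(character_names, locs, window=25):
--     # Two phases.  Phase 1: one left-to-right sweep computes, for every mention i,
--     # its reach -- the first later index whose location falls beyond i's window
--     # (a mention sees the subsequent mentions up to, and excluding, that point).
--     # Phase 2 counts mentions and, per mention, the differently-named mentions
--     # inside its reach.
--     n = len(locs)
--     reach = [n] * n
--     pending = []  # indices whose reach is still open
--     for j, (_, lj) in enumerate(locs):
--         still_open = []
--         for i in pending: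
--             if locs[i][1] + window < lj:
--                 reach[i] = j
--             else:
--                 still_open.append(i)
--         pending = still_open
--         pending.append(j)
--
--     nodes = Counter()
--     edges = {}
--     for i, (ci, _) in enumerate(locs):
--         name = character_names[ci]
--         nodes[name] += 1
--         e = edges.setdefault(name, Counter())
--         for j in range(i + 1, reach[i]):
--             cj = locs[j][0]
--             if cj != ci:
--                 e[character_names[cj]] += 1
--     return nodes, edges
-- ===== Notes on version B (the rewrite author's own statement) =====
-- stated objective: alternative
-- what changed: B is two-phase: a single left-to-right sweep over the still-open mentions computes every mention's reach (the first later index located beyond its window), then a counting pass fills the node counter and, per mention, the edge counters over the indices inside its reach; A instead runs a forward scan with a break from every index.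
import Mathlib
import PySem

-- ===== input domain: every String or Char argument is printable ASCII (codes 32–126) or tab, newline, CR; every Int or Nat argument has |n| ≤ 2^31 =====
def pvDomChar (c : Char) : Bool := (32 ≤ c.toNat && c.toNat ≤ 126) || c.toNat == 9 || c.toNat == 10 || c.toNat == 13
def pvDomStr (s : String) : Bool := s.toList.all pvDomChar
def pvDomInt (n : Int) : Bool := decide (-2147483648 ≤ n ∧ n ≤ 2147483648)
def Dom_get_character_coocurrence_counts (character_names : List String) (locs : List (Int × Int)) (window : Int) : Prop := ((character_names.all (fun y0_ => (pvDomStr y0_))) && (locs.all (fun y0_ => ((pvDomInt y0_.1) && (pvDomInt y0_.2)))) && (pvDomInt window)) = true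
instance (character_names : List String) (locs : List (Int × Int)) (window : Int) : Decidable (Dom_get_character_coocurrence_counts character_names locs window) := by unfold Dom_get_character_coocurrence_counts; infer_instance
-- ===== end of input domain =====

-- B replaces A's per-mention forward scan with a break by a two-phase algorithm: one
-- left-to-right sweep over open mentions computes every mention's reach (the first later
-- index located beyond its window), then a counting pass fills the two counters.
-- Objective: alternative algorithm, same results including dict insertion orders.


-- ===== PORT A =====

-- edges[name1][name2] += 1 (used by both ports; `edges[name1]` always exists when called)
def pvInc (edges : PySem.Dict String (PySem.Dict String Int)) (name1 name2 : String) :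
    PySem.Dict String (PySem.Dict String Int) :=
  edges.modify name1 PySem.Dict.empty (fun c => c.modify name2 0 (· + 1))

-- A's inner `while nextChar < len(locs) - 1: …` loop
def pvAWhile (character_names : List String) (locs : List (Int × Int)) (window loc char_id : Int)
    (name1 : String) (edges : PySem.Dict String (PySem.Dict String Int)) (nextChar : Int) :
    PySem.Dict String (PySem.Dict String Int) :=
  if _h : nextChar < (locs.length : Int) - 1 then
    match PySem.List.pyGet? locs (nextChar + 1) with
    | none => edges  -- unreachable: 0 ≤ nextChar + 1 < len locs at every call
    | some (next_char_id, next_loc) =>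
      if next_loc - loc > window then edges
      else
        pvAWhile character_names locs window loc char_id name1
          (if next_char_id ≠ char_id then
             pvInc edges name1 ((PySem.List.pyGet? character_names next_char_id).getD "")
           else edges)
          (nextChar + 1)
  else edges
termination_by ((locs.length : Int) - nextChar).toNat
decreasing_by omega

def get_character_coocurrence_counts (character_names : List String) (locs : List (Int × Int)) (window : Int) : (List (String × Int)) × (List (String × List (String × Int))) :=
  let res := (PySem.List.enumerate locs).foldl
    (fun (st : PySem.Dict String Int × PySem.Dict String (PySem.Dict String Int)) p =>
      -- name1 lookup raises outside Pre_; `.getD ""` is exact under Pre_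
      let name1 := (PySem.List.pyGet? character_names p.2.1).getD ""
      (st.1.modify name1 0 (· + 1),
       pvAWhile character_names locs window p.2.2 p.2.1 name1
         (if st.2.contains name1 then st.2 else st.2.insert name1 PySem.Dict.empty) p.1))
    (PySem.Dict.empty, PySem.Dict.empty)
  (res.1.items, res.2.items.map (fun q => (q.1, q.2.items)))

-- ===== PORT B =====

def get_character_coocurrence_counts_alt (character_names : List String) (locs : List (Int × Int)) (window : Int) : (List (String × Int)) × (List (String × List (String × Int))) :=
  let n : Nat := locs.length
  -- phase 1: reach[i] = first later index located beyond i's window (sweep over open indices)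
  let sweep := (PySem.List.enumerate locs).foldl
    (fun (st : List Int × List Int) (p : Int × (Int × Int)) =>
      let inner := st.2.foldl
        (fun (q : List Int × List Int) (i : Int) =>
          -- locs[i]: i comes from `pending`, always a valid index, so pyGetD is exact
          if (PySem.List.pyGetD locs i (0, 0)).2 + window < p.2.2 then
            (PySem.List.pySetD q.1 i p.1, q.2)
          else (q.1, q.2 ++ [i]))
        (st.1, ([] : List Int))
      (inner.1, inner.2 ++ [p.1]))
    (List.replicate n ((n : Nat) : Int), ([] : List Int))
  let reach := sweep.1
  -- phase 2: count mentions and, per mention, the differently-named mentions in its reach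
  let res := (PySem.List.enumerate locs).foldl
    (fun (st : PySem.Dict String Int × PySem.Dict String (PySem.Dict String Int)) p =>
      let name := (PySem.List.pyGet? character_names p.2.1).getD ""
      let nodes := st.1.modify name 0 (· + 1)
      let edges := st.2.setdefault name PySem.Dict.empty
      let edges := (PySem.List.pyRange (p.1 + 1) (PySem.List.pyGetD reach p.1 0)).foldl
        (fun e j =>
          let cj := (PySem.List.pyGetD locs j (0, 0)).1
          if cj ≠ p.2.1 then pvInc e name ((PySem.List.pyGet? character_names cj).getD "") else e)
        edges
      (nodes, edges))
    (PySem.Dict.empty, PySem.Dict.empty)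
  (res.1.items, res.2.items.map (fun q => (q.1, q.2.items)))

-- ===== PRECONDITION & SPEC =====
-- Pre_ excludes exactly the inputs where Python A raises IndexError: some char_id in locs
-- is not a valid (possibly negative) index into character_names.
def Pre_get_character_coocurrence_counts (character_names : List String) (locs : List (Int × Int)) (window : Int) : Prop :=
  ∀ p ∈ locs, PySem.Raise.InRange character_names.length p.1
instance (character_names : List String) (locs : List (Int × Int)) (window : Int) : Decidable (Pre_get_character_coocurrence_counts character_names locs window) := by unfold Pre_get_character_coocurrence_counts; infer_instance

def pvWitness_get_character_coocurrence_counts : List String × (List (Int × Int)) × Int :=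
  (["ann", "bob"], [(0, 0), (1, 3), (0, 100)], 25)

def Spec_get_character_coocurrence_counts (character_names : List String) (locs : List (Int × Int)) (window : Int) (out : (List (String × Int)) × (List (String × List (String × Int)))) : Prop := out = get_character_coocurrence_counts_alt character_names locs window
instance (character_names : List String) (locs : List (Int × Int)) (window : Int) (out : (List (String × Int)) × (List (String × List (String × Int)))) : Decidable (Spec_get_character_coocurrence_counts character_names locs window out) := by unfold Spec_get_character_coocurrence_counts; infer_instance

-- ===== CLAIM (what is proved, stated in full; the proofs are below) =====
def Claim_equal_get_character_coocurrence_counts : Prop := ∀ (character_names : List String) (locs : List (Int × Int)) (window : Int), Dom_get_character_coocurrence_counts character_names locs window → Pre_get_character_coocurrence_counts character_names locs window → Spec_get_character_coocurrence_counts character_names locs window (get_character_coocurrence_counts character_names locs window)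

-- ===== LEMMAS AND PROOFS =====

-- abbreviations for the k-th entry of locs
def pvCid (locs : List (Int × Int)) (k : Nat) : Int := (locs.getD k (0, 0)).1
def pvLoc (locs : List (Int × Int)) (k : Nat) : Int := (locs.getD k (0, 0)).2

-- first index j > t with loc_j - L > window (length of locs if none)
def pvBrk (locs : List (Int × Int)) (window L : Int) (t : Nat) : Nat :=
  if _h : t + 1 < locs.length then
    if pvLoc locs (t + 1) - L > window then t + 1 else pvBrk locs window L (t + 1)
  else locs.length
termination_by locs.length - t

-- break point of mention i (scan base i, threshold loc_i + window)
def pvBrkI (locs : List (Int × Int)) (window : Int) (i : Nat) : Nat :=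
  pvBrk locs window (pvLoc locs i) i

theorem pvBrk_le (locs : List (Int × Int)) (window L : Int) :
    ∀ t, pvBrk locs window L t ≤ locs.length := by
  have main : ∀ (m t : Nat), locs.length - t ≤ m → pvBrk locs window L t ≤ locs.length := by
    intro m
    induction m with
    | zero => intro t h; rw [pvBrk, dif_neg (by omega)]
    | succ m ih =>
      intro t h
      by_cases hlt : t + 1 < locs.length
      · rw [pvBrk, dif_pos hlt]
        split_ifs with hb
        · omega
        · exact ih (t + 1) (by omega)
      · rw [pvBrk, dif_neg hlt]
  exact fun t => main (locs.length - t) t le_rfl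

theorem pvBrk_gt (locs : List (Int × Int)) (window L : Int) :
    ∀ t, t < locs.length → t < pvBrk locs window L t := by
  have main : ∀ (m t : Nat), locs.length - t ≤ m → t < locs.length → t < pvBrk locs window L t := by
    intro m
    induction m with
    | zero => intro t h ht; omega
    | succ m ih =>
      intro t h ht
      by_cases hlt : t + 1 < locs.length
      · rw [pvBrk, dif_pos hlt]
        split_ifs with hb
        · omega
        · have := ih (t + 1) (by omega) (by omega)
          omega
      · rw [pvBrk, dif_neg hlt]; omega
  exact fun t ht => main (locs.length - t) t le_rfl ht

theorem pvBrk_ge_iff (locs : List (Int × Int)) (window L : Int) :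
    ∀ t J, J ≤ locs.length →
      (J ≤ pvBrk locs window L t ↔ ∀ j, t < j → j < J → pvLoc locs j ≤ L + window) := by
  have main : ∀ (m t J : Nat), locs.length - t ≤ m → J ≤ locs.length →
      (J ≤ pvBrk locs window L t ↔ ∀ j, t < j → j < J → pvLoc locs j ≤ L + window) := by
    intro m
    induction m with
    | zero =>
      intro t J h hJ
      rw [pvBrk, dif_neg (by omega)]
      constructor
      · intro _ j hj1 hj2; omega
      · intro _; exact hJ
    | succ m ih =>
      intro t J h hJ
      by_cases hlt : t + 1 < locs.length
      · rw [pvBrk, dif_pos hlt]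
        split_ifs with hb
        · constructor
          · intro hle j hj1 hj2; omega
          · intro hall
            by_contra hgt
            have := hall (t + 1) (by omega) (by omega)
            omega
        · rw [ih (t + 1) J (by omega) hJ]
          constructor
          · intro hall j hj1 hj2
            by_cases hjt : j = t + 1
            · subst hjt; omega
            · exact hall j (by omega) hj2
          · intro hall j hj1 hj2
            exact hall j (by omega) hj2
      · rw [pvBrk, dif_neg hlt]
        constructor
        · intro _ j hj1 hj2; omega
        · intro _; exact hJ
  exact fun t J hJ => main (locs.length - t) t J le_rfl hJ

-- A's scanned segment, as computed by the while loop
def pvSeg (locs : List (Int × Int)) (window L C : Int) (t : Nat) : List Nat :=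
  if _h : t + 1 < locs.length then
    if pvLoc locs (t + 1) - L > window then []
    else (if pvCid locs (t + 1) ≠ C then [t + 1] else []) ++ pvSeg locs window L C (t + 1)
  else []
termination_by locs.length - t

theorem pvAWhile_eq (cns : List String) (locs : List (Int × Int)) (window L C : Int)
    (name1 : String) : ∀ t : Nat, ∀ edges,
    pvAWhile cns locs window L C name1 edges (t : Int) =
      (pvSeg locs window L C t).foldl
        (fun e j => pvInc e name1 ((PySem.List.pyGet? cns (pvCid locs j)).getD "")) edges := by
  have main : ∀ (m t : Nat) (edges), locs.length - t ≤ m →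
      pvAWhile cns locs window L C name1 edges (t : Int) =
        (pvSeg locs window L C t).foldl
          (fun e j => pvInc e name1 ((PySem.List.pyGet? cns (pvCid locs j)).getD "")) edges := by
    intro m
    induction m with
    | zero =>
      intro t edges h
      rw [pvAWhile, pvSeg, dif_neg (by omega), dif_neg (by omega)]
      simp
    | succ m ih =>
      intro t edges h
      by_cases hlt : t + 1 < locs.length
      · rw [pvAWhile, pvSeg, dif_pos (by omega : (t : Int) < (locs.length : Int) - 1),
          dif_pos hlt]
        have hcast : ((t : Int) + 1) = ((t + 1 : Nat) : Int) := by push_cast; ring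
        rcases hp : locs.getD (t + 1) (0, 0) with ⟨c, l⟩
        have hget : PySem.List.pyGet? locs ((t : Int) + 1) = some (c, l) := by
          rw [hcast, PySem.List.pyGet?_natCast, List.getElem?_eq_getElem hlt, ← hp,
            List.getD_eq_getElem _ _ hlt]
        rw [hget]
        have hLoc : pvLoc locs (t + 1) = l := by unfold pvLoc; rw [hp]
        have hCid : pvCid locs (t + 1) = c := by unfold pvCid; rw [hp]
        rw [hLoc, hCid]
        show (if l - L > window then edges
          else pvAWhile cns locs window L C name1
            (if c ≠ C then pvInc edges name1 ((PySem.List.pyGet? cns c).getD "") else edges)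
            ((t : Int) + 1)) = _
        by_cases hbr : l - L > window
        · simp [hbr]
        · rw [if_neg hbr, if_neg hbr, List.foldl_append, hcast, ih (t + 1) _ (by omega)]
          congr 1
          by_cases hc : c ≠ C
          · rw [if_pos hc, if_pos hc]
            simp only [List.foldl_cons, List.foldl_nil, hCid]
          · rw [if_neg hc, if_neg hc]
            simp
      · rw [pvAWhile, pvSeg, dif_neg (by omega), dif_neg hlt]
        simp
  exact fun t edges => main (locs.length - t) t edges le_rfl

theorem pvSeg_eq (locs : List (Int × Int)) (window L C : Int) :
    ∀ t, pvSeg locs window L C t =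
      (List.range' (t + 1) (pvBrk locs window L t - (t + 1))).filter
        (fun j => decide (pvCid locs j ≠ C)) := by
  have main : ∀ (m t : Nat), locs.length - t ≤ m →
      pvSeg locs window L C t =
        (List.range' (t + 1) (pvBrk locs window L t - (t + 1))).filter
          (fun j => decide (pvCid locs j ≠ C)) := by
    intro m
    induction m with
    | zero =>
      intro t h
      rw [pvSeg, pvBrk, dif_neg (by omega), dif_neg (by omega),
        show locs.length - (t + 1) = 0 by omega]
      simp
    | succ m ih =>
      intro t h
      by_cases hlt : t + 1 < locs.length
      · rw [pvSeg, pvBrk, dif_pos hlt, dif_pos hlt]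
        by_cases hb : pvLoc locs (t + 1) - L > window
        · rw [if_pos hb, if_pos hb]; simp
        · rw [if_neg hb, if_neg hb]
          have hgt : t + 1 < pvBrk locs window L (t + 1) :=
            pvBrk_gt locs window L (t + 1) hlt
          rw [show pvBrk locs window L (t + 1) - (t + 1) =
              (pvBrk locs window L (t + 1) - (t + 2)) + 1 by omega,
            List.range'_succ, List.filter_cons, ih (t + 1) (by omega)]
          by_cases hc : pvCid locs (t + 1) ≠ C
          · rw [if_pos hc]
            simp [hc]
          · rw [if_neg hc]
            simp [hc]
      · rw [pvSeg, pvBrk, dif_neg hlt, dif_neg hlt,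
          show locs.length - (t + 1) = 0 by omega]
        simp
  exact fun t => main (locs.length - t) t le_rfl

-- phase-1 inner loop over the pending list
theorem pvInnerFold (locs : List (Int × Int)) (window lj J : Int) :
    ∀ (l : List Nat) (reach acc : List Int),
    (l.map Int.ofNat).foldl
      (fun (q : List Int × List Int) (i : Int) =>
        if (PySem.List.pyGetD locs i (0, 0)).2 + window < lj then
          (PySem.List.pySetD q.1 i J, q.2)
        else (q.1, q.2 ++ [i]))
      (reach, acc) =
    (l.foldl (fun r i => if pvLoc locs i + window < lj then r.set i J else r) reach,
     acc ++ (l.filter (fun i => decide (pvLoc locs i + window < lj) = false)).map Int.ofNat) := by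
  intro l
  induction l with
  | nil => intro reach acc; simp
  | cons i rest ih =>
    intro reach acc
    rw [List.map_cons, List.foldl_cons, List.filter_cons]
    have hget : (PySem.List.pyGetD locs (Int.ofNat i) (0, 0)).2 = pvLoc locs i := by
      rw [show (Int.ofNat i) = ((i : Nat) : Int) from rfl, PySem.List.pyGetD_natCast]; rfl
    by_cases hc : pvLoc locs i + window < lj
    · rw [if_pos (by rw [hget]; exact hc)]
      rw [show PySem.List.pySetD reach (Int.ofNat i) J = reach.set i J from
        PySem.List.pySetD_natCast reach i J]
      rw [ih (reach.set i J) acc, List.foldl_cons, if_pos hc]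
      simp [hc]
    · rw [if_neg (by rw [hget]; exact hc)]
      rw [ih reach (acc ++ [Int.ofNat i]), List.foldl_cons, if_neg hc]
      simp [hc]

-- getD through a fold of conditional sets (all to the same value)
theorem pvSetFold (P : Nat → Prop) [inst : DecidablePred P] (v : Int) :
    ∀ (l : List Nat) (reach : List Int),
    ((l.foldl (fun r i => if P i then r.set i v else r) reach).length = reach.length) ∧
    ∀ k, (l.foldl (fun r i => if P i then r.set i v else r) reach).getD k 0 =
      if k ∈ l ∧ P k ∧ k < reach.length then v else reach.getD k 0 := by
  intro l
  induction l with
  | nil => intro reach; simp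
  | cons i rest ih =>
    intro reach
    rw [List.foldl_cons]
    set r1 := if P i then reach.set i v else reach with hr1
    have hlen1 : r1.length = reach.length := by
      rw [hr1]; split_ifs <;> simp
    obtain ⟨ihlen, ihget⟩ := ih r1
    refine ⟨by rw [ihlen, hlen1], ?_⟩
    intro k
    rw [ihget k, hlen1]
    have hr1get : r1.getD k 0 = if k = i ∧ P i ∧ k < reach.length then v else reach.getD k 0 := by
      rw [hr1]
      by_cases hp : P i
      · rw [if_pos hp]
        simp only [List.getD_eq_getElem?_getD, List.getElem?_set]
        by_cases hk : i = k
        · subst hk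
          by_cases hb : i < reach.length
          · simp [hb, hp]
          · simp [hb, hp]
        · have : ¬ (k = i ∧ P i ∧ k < reach.length) := by tauto
          simp [hk, this]
      · rw [if_neg hp, if_neg (by tauto)]
    rw [hr1get]
    by_cases h1 : k ∈ rest ∧ P k ∧ k < reach.length
    · rw [if_pos h1, if_pos ⟨by simp [h1.1], h1.2⟩]
    · rw [if_neg h1]
      by_cases h2 : k = i ∧ P i ∧ k < reach.length
      · obtain ⟨hki, hpi, hkb⟩ := h2
        subst hki
        simp [hpi, hkb]
      · rw [if_neg h2, if_neg (by
          rintro ⟨hm, hpk, hb⟩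
          rcases List.mem_cons.mp hm with he | hm2
          · exact h2 ⟨he, by rw [← he]; exact hpk, hb⟩
          · exact h1 ⟨hm2, hpk, hb⟩)]

-- one step of the window relation: J+1 ≤ brk(i) iff J ≤ brk(i) and loc_J is within i's window
theorem pvBrk_succ_iff (locs : List (Int × Int)) (window : Int) (i J : Nat)
    (hi : i < J) (hJ : J < locs.length) :
    J + 1 ≤ pvBrkI locs window i ↔
      (J ≤ pvBrkI locs window i ∧ pvLoc locs J ≤ pvLoc locs i + window) := by
  unfold pvBrkI
  rw [pvBrk_ge_iff locs window (pvLoc locs i) i (J + 1) (by omega),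
    pvBrk_ge_iff locs window (pvLoc locs i) i J (by omega)]
  constructor
  · intro h
    exact ⟨fun j hj1 hj2 => h j hj1 (by omega), h J hi (by omega)⟩
  · rintro ⟨h1, h2⟩ j hj1 hj2
    by_cases hje : j = J
    · subst hje; exact h2
    · exact h1 j hj1 (by omega)

-- phase-1 sweep: after the whole fold, reach = breakpoints, entrywise
theorem pvSweep (locs : List (Int × Int)) (window : Int) :
    ∀ J : Nat, J ≤ locs.length →
    ((PySem.List.enumerate locs).take J).foldl
      (fun (st : List Int × List Int) (p : Int × (Int × Int)) =>
        let inner := st.2.foldl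
          (fun (q : List Int × List Int) (i : Int) =>
            if (PySem.List.pyGetD locs i (0, 0)).2 + window < p.2.2 then
              (PySem.List.pySetD q.1 i p.1, q.2)
            else (q.1, q.2 ++ [i]))
          (st.1, ([] : List Int))
        (inner.1, inner.2 ++ [p.1]))
      (List.replicate locs.length ((locs.length : Nat) : Int), ([] : List Int)) =
    ((List.range locs.length).map (fun i =>
        ((if pvBrkI locs window i < J then pvBrkI locs window i else locs.length : Nat) : Int)),
     ((List.range J).filter (fun i => decide (J ≤ pvBrkI locs window i))).map Int.ofNat) := by
  intro J
  induction J with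
  | zero =>
    intro _
    rw [List.take_zero, List.foldl_nil]
    refine Prod.ext ?_ (by simp)
    show List.replicate locs.length ((locs.length : Nat) : Int) = _
    rw [show (fun i => ((if pvBrkI locs window i < 0 then pvBrkI locs window i
          else locs.length : Nat) : Int)) = (fun _ : Nat => ((locs.length : Nat) : Int)) from
        funext (fun i => by simp)]
    simp [List.map_const']
  | succ J ih =>
    intro hJ1
    have hJ : J < locs.length := by omega
    have hBgtJ : J < pvBrkI locs window J := pvBrk_gt locs window (pvLoc locs J) J hJ
    have hgetJ : (PySem.List.enumerate locs)[J]? = some (((J : Nat) : Int), locs.getD J (0, 0)) := by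
      rw [PySem.List.getElem?_enumerate, List.getElem?_eq_getElem hJ,
        List.getD_eq_getElem _ _ hJ]
      simp
    rw [List.take_add_one, List.foldl_append, ih (by omega), hgetJ]
    simp only [Option.toList_some, List.foldl_cons, List.foldl_nil]
    rw [pvInnerFold locs window (locs.getD J (0, 0)).2 ((J : Nat) : Int)]
    simp only [show ((locs.getD J (0, 0)).2) = pvLoc locs J from rfl]
    refine Prod.ext ?_ ?_
    · -- reach component
      obtain ⟨hlen, hget⟩ := pvSetFold
        (fun i => pvLoc locs i + window < pvLoc locs J) ((J : Nat) : Int)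
        ((List.range J).filter fun i => decide (J ≤ pvBrkI locs window i))
        ((List.range locs.length).map fun i =>
          ((if pvBrkI locs window i < J then pvBrkI locs window i
            else locs.length : Nat) : Int))
      have hml : ((List.range locs.length).map fun i =>
          ((if pvBrkI locs window i < J then pvBrkI locs window i
            else locs.length : Nat) : Int)).length = locs.length := by simp
      apply List.ext_getElem (by rw [hlen, hml]; simp)
      intro k hk1 hk2
      have hkn : k < locs.length := by
        rw [hlen, hml] at hk1; exact hk1
      have hBle : pvBrkI locs window k ≤ locs.length := pvBrk_le locs window (pvLoc locs k) k
      have hBgt : k < pvBrkI locs window k := pvBrk_gt locs window (pvLoc locs k) k hkn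
      rw [← List.getD_eq_getElem _ 0 hk1, ← List.getD_eq_getElem _ 0 hk2, hget k, hml,
        List.getD_eq_getElem _ _ (by simpa using hkn),
        List.getElem_map, List.getElem_range,
        List.getD_eq_getElem _ _ (by simpa using hkn),
        List.getElem_map, List.getElem_range]
      by_cases hmem : k ∈ (List.range J).filter fun i => decide (J ≤ pvBrkI locs window i)
      · have hk : k < J ∧ J ≤ pvBrkI locs window k := by
          simpa using hmem
        by_cases hcond : pvLoc locs k + window < pvLoc locs J
        · rw [if_pos ⟨hmem, hcond, hkn⟩]
          have hBeq : pvBrkI locs window k = J := by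
            have := (pvBrk_succ_iff locs window k J hk.1 hJ).mpr
            by_contra hne
            have hge : J + 1 ≤ pvBrkI locs window k := by omega
            have := (pvBrk_succ_iff locs window k J hk.1 hJ).mp hge
            omega
          rw [if_pos (by omega), hBeq]
        · rw [if_neg (by rintro ⟨_, hc, _⟩; exact hcond hc)]
          have hge : J + 1 ≤ pvBrkI locs window k :=
            (pvBrk_succ_iff locs window k J hk.1 hJ).mpr ⟨hk.2, by omega⟩
          rw [if_neg (by omega), if_neg (by omega)]
      · rw [if_neg (by rintro ⟨hm, _, _⟩; exact hmem hm)]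
        by_cases hklt : k < J
        · have hBlt : pvBrkI locs window k < J := by
            rcases Nat.lt_or_ge (pvBrkI locs window k) J with h | h
            · exact h
            · exact absurd (by simpa using (⟨List.mem_range.mpr hklt, by simpa using h⟩ :
                k ∈ List.range J ∧ _)) (by
                  intro hc
                  exact hmem (List.mem_filter.mpr ⟨List.mem_range.mpr hklt, by simpa using h⟩))
          rw [if_pos hBlt, if_pos (by omega)]
        · have : ¬ pvBrkI locs window k < J := by omega
          rw [if_neg this, if_neg (by omega)]
    · -- pending component
      show ([] ++ _) ++ [((J : Nat) : Int)] = _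
      rw [List.nil_append, List.range_succ, List.filter_append, List.map_append]
      have hJin : (List.filter (fun i => decide (J + 1 ≤ pvBrkI locs window i)) [J]) = [J] := by
        simp only [List.filter_cons, List.filter_nil]
        rw [if_pos (by simpa using (by omega : J + 1 ≤ pvBrkI locs window J))]
      rw [hJin]
      congr 1
      rw [List.filter_filter]
      refine congrArg (List.map Int.ofNat) (List.filter_congr ?_)
      intro i hi
      have hiJ : i < J := List.mem_range.mp hi
      have hiff := pvBrk_succ_iff locs window i J hiJ hJ
      by_cases h1 : J + 1 ≤ pvBrkI locs window i
      · have h2 := hiff.mp h1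
        simp [h1, h2.1, not_lt.mpr h2.2]
      · simp only [] at *
        by_cases h3 : J ≤ pvBrkI locs window i
        · have h4 : pvLoc locs J ≤ pvLoc locs i + window → False := fun hc =>
            h1 (hiff.mpr ⟨h3, hc⟩)
          have h5 : pvLoc locs i + window < pvLoc locs J := by omega
          simp [h1, h3, h5]
        · simp [h1, h3]

-- the sweep over the whole list: reach holds every mention's break point
theorem pvSweepFull (locs : List (Int × Int)) (window : Int) :
    (PySem.List.enumerate locs).foldl
      (fun (st : List Int × List Int) (p : Int × (Int × Int)) =>
        let inner := st.2.foldl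
          (fun (q : List Int × List Int) (i : Int) =>
            if (PySem.List.pyGetD locs i (0, 0)).2 + window < p.2.2 then
              (PySem.List.pySetD q.1 i p.1, q.2)
            else (q.1, q.2 ++ [i]))
          (st.1, ([] : List Int))
        (inner.1, inner.2 ++ [p.1]))
      (List.replicate locs.length ((locs.length : Nat) : Int), ([] : List Int)) =
    ((List.range locs.length).map (fun i => ((pvBrkI locs window i : Nat) : Int)),
     ((List.range locs.length).filter
        (fun i => decide (locs.length ≤ pvBrkI locs window i))).map Int.ofNat) := by
  have h := pvSweep locs window locs.length le_rfl
  rw [show List.take locs.length (PySem.List.enumerate locs) = PySem.List.enumerate locs from by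
    rw [← PySem.List.length_enumerate locs 0]; exact List.take_length] at h
  rw [h]
  refine Prod.ext (List.map_congr_left ?_) rfl
  intro i hi
  have hle := pvBrk_le locs window (pvLoc locs i) i
  unfold pvBrkI
  congr 1
  split_ifs <;> omega

-- dict.setdefault as A writes it
theorem pvSetdefault {ν : Type} (d : PySem.Dict String ν) (k : String) (v : ν) :
    d.setdefault k v = if d.contains k then d else d.insert k v := by
  by_cases h : d.contains k
  · rw [if_pos h, PySem.Dict.setdefault_of_contains d v h]
  · rw [if_neg h, PySem.Dict.setdefault_of_not_contains d v (by simpa using h)]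

-- ===== VERDICT (by name: the statement is the Claim_ definition above) =====
theorem get_character_coocurrence_counts_spec : Claim_equal_get_character_coocurrence_counts := by
  intro cns locs window _ _
  unfold Spec_get_character_coocurrence_counts
  simp only [get_character_coocurrence_counts, get_character_coocurrence_counts_alt]
  rw [pvSweepFull locs window]
  have hfold :
      (PySem.List.enumerate locs).foldl
        (fun (st : PySem.Dict String Int × PySem.Dict String (PySem.Dict String Int))
             (p : Int × (Int × Int)) =>
          (st.1.modify ((PySem.List.pyGet? cns p.2.1).getD "") 0 (· + 1),
           pvAWhile cns locs window p.2.2 p.2.1 ((PySem.List.pyGet? cns p.2.1).getD "")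
             (if st.2.contains ((PySem.List.pyGet? cns p.2.1).getD "") then st.2
              else st.2.insert ((PySem.List.pyGet? cns p.2.1).getD "") PySem.Dict.empty) p.1))
        (PySem.Dict.empty, PySem.Dict.empty) =
      (PySem.List.enumerate locs).foldl
        (fun (st : PySem.Dict String Int × PySem.Dict String (PySem.Dict String Int))
             (p : Int × (Int × Int)) =>
          (st.1.modify ((PySem.List.pyGet? cns p.2.1).getD "") 0 (· + 1),
           (PySem.List.pyRange (p.1 + 1)
              (PySem.List.pyGetD
                ((List.range locs.length).map (fun i => ((pvBrkI locs window i : Nat) : Int)))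
                p.1 0)).foldl
             (fun e j =>
               if (PySem.List.pyGetD locs j (0, 0)).1 ≠ p.2.1 then
                 pvInc e ((PySem.List.pyGet? cns p.2.1).getD "")
                   ((PySem.List.pyGet? cns (PySem.List.pyGetD locs j (0, 0)).1).getD "")
               else e)
             (st.2.setdefault ((PySem.List.pyGet? cns p.2.1).getD "") PySem.Dict.empty)))
        (PySem.Dict.empty, PySem.Dict.empty) := by
    rw [PySem.List.enumerate_eq_map_pyRange locs (0, 0)]
    simp only [List.foldl_map]
    rw [show PySem.List.len locs = ((locs.length : Nat) : Int) by simp,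
      PySem.List.pyRange_zero_nat]
    simp only [List.foldl_map]
    refine PySem.List.foldl_congr_mem _ _ _ _ ?_
    intro acc k hk
    have hkn : k < locs.length := List.mem_range.mp hk
    simp only [PySem.List.pyGetD_natCast]
    refine Prod.ext rfl ?_
    show pvAWhile cns locs window (locs.getD k (0, 0)).2 (locs.getD k (0, 0)).1
        ((PySem.List.pyGet? cns (locs.getD k (0, 0)).1).getD "")
        (if acc.2.contains ((PySem.List.pyGet? cns (locs.getD k (0, 0)).1).getD "") then acc.2
         else acc.2.insert ((PySem.List.pyGet? cns (locs.getD k (0, 0)).1).getD "")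
           PySem.Dict.empty) ((k : Nat) : Int) = _
    rw [pvSetdefault]
    rw [PySem.List.getD_map_range (fun i => ((pvBrkI locs window i : Nat) : Int))
      locs.length k 0 hkn]
    rw [pvAWhile_eq cns locs window (locs.getD k (0, 0)).2 (locs.getD k (0, 0)).1
      ((PySem.List.pyGet? cns (locs.getD k (0, 0)).1).getD "") k]
    rw [show pvSeg locs window (locs.getD k (0, 0)).2 (locs.getD k (0, 0)).1 k =
        pvSeg locs window (pvLoc locs k) (pvCid locs k) k from rfl,
      pvSeg_eq locs window (pvLoc locs k) (pvCid locs k) k, List.foldl_filter]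
    rw [show ((k : Nat) : Int) + 1 = ((k + 1 : Nat) : Int) by push_cast; ring,
      PySem.List.pyRange_one ((k + 1 : Nat) : Int) ((pvBrkI locs window k : Nat) : Int),
      show (((pvBrkI locs window k : Nat) : Int) - ((k + 1 : Nat) : Int)).toNat =
        pvBrkI locs window k - (k + 1) by omega,
      List.foldl_map, List.range'_eq_map_range, List.foldl_map]
    refine PySem.List.foldl_congr_mem _ _ _ _ ?_
    intro e t _
    rw [show ((k + 1 : Nat) : Int) + (t : Int) = ((k + 1 + t : Nat) : Int) by push_cast; ring,
      PySem.List.pyGetD_natCast]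
    by_cases hc : (locs.getD (k + 1 + t) (0, 0)).1 ≠ (locs.getD k (0, 0)).1
    · rw [if_pos hc, if_pos (by simpa [pvCid] using hc)]
      rfl
    · rw [if_neg hc, if_neg (by simpa [pvCid] using hc)]
  exact congrArg (fun r => (r.1.items, r.2.items.map (fun q => (q.1, q.2.items)))) hfold
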